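-- pv_equiv track=rewrite | github.com/bglossner/Python-Calculator | Calculator/factorPy.py | doTri
-- ===== SOURCE A (Python) =====
-- def findFactors(num):
--     l = list(filter(lambda x: num % x == 0, range(1, num + 1)))
--     if(len(l) % 2 == 1):
--         l.insert(int(len(l) / 2), l[int(len(l) / 2)])
--     return l
--
-- def doTri(termsList):
--     lfacs = findFactors(abs(termsList[2]))
--     fterm = termsList[0]
--     addTerm = termsList[1]
--     lterm = termsList[2]
--     if termsList[0] == 1:
--         for i in range(int(len(lfacs) / 2)):
--             firstNum, secondNum = lfacs[i], lfacs[len(lfacs) - i - 1]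
--             if firstNum + secondNum == abs(addTerm) or (addTerm == 0 and lterm > 0):
--                 tup = (firstNum, secondNum) if addTerm > 0 else (-1 * firstNum, -1 * secondNum)
--             else:
--                 tup = (firstNum * -1, secondNum) if addTerm > 0 else (firstNum, secondNum * -1)
--             if tup[0] + tup[1] == addTerm:
--                 return ("(x+%d)(x+%d)" % tup).replace("+-", "-")
--         return None
--     else:
--         ffacs = findFactors(abs(termsList[0]))
--         ffacs = [num * -1 for num in ffacs] + ffacs
--         ffacs.sort(reverse=True)
--         lfacs = [num * -1 for num in lfacs] + lfacs
--         lfacs.sort(reverse=True)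
--         for i in range(int(len(ffacs) / 4)): #efficient
--             fL = [ffacs[i], ffacs[int(len(ffacs)/2)-1-i], ffacs[int(len(ffacs)/2)+i], ffacs[len(ffacs)-1-i]]
--             if fterm > 0:
--                 useL = [(fL[0], fL[1]), (fL[2], fL[3])]
--             else:
--                 useL = [(fL[0], fL[2]), (fL[1], fL[3])]
--             for tup in useL:
--                 for i2 in range(int(len(lfacs) / 4)):
--                     lL = [lfacs[i2], lfacs[int(len(lfacs)/2)-1-i2], lfacs[int(len(lfacs)/2)+i2], lfacs[len(lfacs)-1-i2]]
--                     if lterm > 0: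
--                         useL2 = [(lL[0], lL[1]), (lL[2], lL[3])]
--                     else:
--                         useL2 = [(lL[0], lL[2]), (lL[1], lL[3])]
--                     for tup2 in useL2:
--                         if (tup2[0] * tup[1]) + (tup2[1] * tup[0]) == addTerm:
--                             return (("(%dx+%d)(%dx+%d)" % (tup[0], tup2[0], tup[1], tup2[1])).replace("+-", "-")).replace("1x","x")
--                         elif(tup[0] * tup2[0]) + (tup[1] * tup2[1]) == addTerm:
--                             return (("(%dx+%d)(%dx+%d)" % (tup[0], tup2[1], tup[1], tup2[0])).replace("+-", "-")).replace("1x","x")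
--         return None
-- ===== SOURCE B (Python) =====
-- def _divisor_pairs(n):
--     # ascending (d, n // d) over all divisors d with d*d <= n, found in O(sqrt n)
--     pairs = []
--     f = 1
--     while f * f <= n:
--         if n % f == 0:
--             pairs.append((f, n // f))
--         f += 1
--     return pairs
--
--
-- def _fmt1(p, q):
--     return ("(x+%d)(x+%d)" % (p, q)).replace("+-", "-")
--
--
-- def _fmt2(p, q, r, s):
--     return ("(%dx+%d)(%dx+%d)" % (p, q, r, s)).replace("+-", "-").replace("1x", "x")
--
--
-- def doTri(termsList):
--     fterm, addTerm, lterm = termsList[0], termsList[1], termsList[2]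
--     lpairs = _divisor_pairs(abs(lterm))
--     if fterm == 1:
--         for d, e in lpairs:
--             if addTerm > 0:
--                 if d + e == addTerm:
--                     return _fmt1(d, e)
--                 if e - d == addTerm:
--                     return _fmt1(-d, e)
--             elif addTerm < 0:
--                 if d + e == -addTerm:
--                     return _fmt1(-d, -e)
--                 if d - e == addTerm:
--                     return _fmt1(d, -e)
--             else:
--                 if lterm < 0 and d == e:
--                     return _fmt1(d, -e)
--         return None
--     for fd, fD in _divisor_pairs(abs(fterm)):
--         fcands = [(fD, fd), (-fd, -fD)] if fterm > 0 else [(fD, -fd), (fd, -fD)]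
--         for f1, f2 in fcands:
--             for ld, lD in lpairs:
--                 lcands = [(lD, ld), (-ld, -lD)] if lterm > 0 else [(lD, -ld), (ld, -lD)]
--                 for l1, l2 in lcands:
--                     if l1 * f2 + l2 * f1 == addTerm:
--                         return _fmt2(f1, l1, f2, l2)
--                     if f1 * l1 + f2 * l2 == addTerm:
--                         return _fmt2(f1, l2, f2, l1)
--     return None
-- ===== Notes on version B (the rewrite author's own statement) =====
-- stated objective: faster
-- what changed: B finds each divisor pair (d, n//d) by trial division up to sqrt(n) instead of A's scan of 1..n, and walks those pairs directly in the sign combinations A reaches via its merged, negated, re-sorted factor lists and four-way index arithmetic.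
import Mathlib
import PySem

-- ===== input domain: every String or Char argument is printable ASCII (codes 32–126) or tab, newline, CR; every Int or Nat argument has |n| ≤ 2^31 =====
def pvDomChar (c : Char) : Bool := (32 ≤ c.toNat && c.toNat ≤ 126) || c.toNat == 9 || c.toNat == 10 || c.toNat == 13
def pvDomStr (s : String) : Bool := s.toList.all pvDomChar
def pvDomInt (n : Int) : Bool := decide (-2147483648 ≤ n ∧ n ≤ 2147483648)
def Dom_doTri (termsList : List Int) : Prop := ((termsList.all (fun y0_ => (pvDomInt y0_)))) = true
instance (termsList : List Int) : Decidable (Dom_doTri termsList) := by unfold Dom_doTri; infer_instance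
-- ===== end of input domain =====

-- B re-implements A's trinomial factoriser: divisors are enumerated as (d, n//d) pairs in
-- O(sqrt n) instead of scanning 1..n, and the search walks those pairs directly instead of
-- A's merged ±-sorted lists with index arithmetic; same return value on every admitted input.

-- ===== PORT A =====
def findFactors (num : Int) : List Int :=
  let l := (PySem.List.pyRange 1 (num + 1) 1).filter (fun x => PySem.Int.mod num x == 0)
  if l.length % 2 == 1 then
    PySem.List.insert l ((l.length : Int) / 2) (PySem.List.pyGetD l ((l.length : Int) / 2) 0)
  else l

def doTriLoop1 (lfacs : List Int) (addTerm lterm : Int) : List Int → Option String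
  | [] => none
  | i :: rest =>
    let firstNum := PySem.List.pyGetD lfacs i 0
    let secondNum := PySem.List.pyGetD lfacs ((lfacs.length : Int) - i - 1) 0
    let tup : Int × Int :=
      if firstNum + secondNum = |addTerm| ∨ (addTerm = 0 ∧ lterm > 0) then
        (if addTerm > 0 then (firstNum, secondNum) else (-1 * firstNum, -1 * secondNum))
      else
        (if addTerm > 0 then (firstNum * -1, secondNum) else (firstNum, secondNum * -1))
    if tup.1 + tup.2 = addTerm then
      some (PySem.Str.replace ("(x+" ++ PySem.Int.toStr tup.1 ++ ")(x+" ++ PySem.Int.toStr tup.2 ++ ")") "+-" "-")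
    else doTriLoop1 lfacs addTerm lterm rest

def doTriCheck (tup : Int × Int) (addTerm : Int) : List (Int × Int) → Option String
  | [] => none
  | tup2 :: rest =>
    if tup2.1 * tup.2 + tup2.2 * tup.1 = addTerm then
      some (PySem.Str.replace (PySem.Str.replace
        ("(" ++ PySem.Int.toStr tup.1 ++ "x+" ++ PySem.Int.toStr tup2.1 ++ ")(" ++
         PySem.Int.toStr tup.2 ++ "x+" ++ PySem.Int.toStr tup2.2 ++ ")") "+-" "-") "1x" "x")
    else if tup.1 * tup2.1 + tup.2 * tup2.2 = addTerm then
      some (PySem.Str.replace (PySem.Str.replace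
        ("(" ++ PySem.Int.toStr tup.1 ++ "x+" ++ PySem.Int.toStr tup2.2 ++ ")(" ++
         PySem.Int.toStr tup.2 ++ "x+" ++ PySem.Int.toStr tup2.1 ++ ")") "+-" "-") "1x" "x")
    else doTriCheck tup addTerm rest

def doTriLoopI2 (lfacs2 : List Int) (addTerm lterm : Int) (tup : Int × Int) : List Int → Option String
  | [] => none
  | i2 :: rest =>
    let lL0 := PySem.List.pyGetD lfacs2 i2 0
    let lL1 := PySem.List.pyGetD lfacs2 ((lfacs2.length : Int) / 2 - 1 - i2) 0
    let lL2 := PySem.List.pyGetD lfacs2 ((lfacs2.length : Int) / 2 + i2) 0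
    let lL3 := PySem.List.pyGetD lfacs2 ((lfacs2.length : Int) - 1 - i2) 0
    let useL2 : List (Int × Int) :=
      if lterm > 0 then [(lL0, lL1), (lL2, lL3)] else [(lL0, lL2), (lL1, lL3)]
    match doTriCheck tup addTerm useL2 with
    | some s => some s
    | none => doTriLoopI2 lfacs2 addTerm lterm tup rest

def doTriLoopTup (lfacs2 : List Int) (addTerm lterm : Int) : List (Int × Int) → Option String
  | [] => none
  | tup :: rest =>
    match doTriLoopI2 lfacs2 addTerm lterm tup (PySem.List.pyRange 0 ((lfacs2.length : Int) / 4) 1) with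
    | some s => some s
    | none => doTriLoopTup lfacs2 addTerm lterm rest

def doTriLoopI (ffacs lfacs2 : List Int) (addTerm lterm fterm : Int) : List Int → Option String
  | [] => none
  | i :: rest =>
    let fL0 := PySem.List.pyGetD ffacs i 0
    let fL1 := PySem.List.pyGetD ffacs ((ffacs.length : Int) / 2 - 1 - i) 0
    let fL2 := PySem.List.pyGetD ffacs ((ffacs.length : Int) / 2 + i) 0
    let fL3 := PySem.List.pyGetD ffacs ((ffacs.length : Int) - 1 - i) 0
    let useL : List (Int × Int) :=
      if fterm > 0 then [(fL0, fL1), (fL2, fL3)] else [(fL0, fL2), (fL1, fL3)]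
    match doTriLoopTup lfacs2 addTerm lterm useL with
    | some s => some s
    | none => doTriLoopI ffacs lfacs2 addTerm lterm fterm rest

def doTri (termsList : List Int) : Option String :=
  let lfacs := findFactors |PySem.List.pyGetD termsList 2 0|
  let fterm := PySem.List.pyGetD termsList 0 0
  let addTerm := PySem.List.pyGetD termsList 1 0
  let lterm := PySem.List.pyGetD termsList 2 0
  if fterm = 1 then
    doTriLoop1 lfacs addTerm lterm (PySem.List.pyRange 0 ((lfacs.length : Int) / 2) 1)
  else
    let ffacs0 := findFactors |fterm|
    let ffacs := PySem.List.sorted (ffacs0.map (fun num => num * -1) ++ ffacs0) (fun x => x) true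
    let lfacs2 := PySem.List.sorted (lfacs.map (fun num => num * -1) ++ lfacs) (fun x => x) true
    doTriLoopI ffacs lfacs2 addTerm lterm fterm (PySem.List.pyRange 0 ((ffacs.length : Int) / 4) 1)

-- ===== PORT B =====
-- Source B's while loop 'while f*f <= n: …; f += 1', collecting ascending divisor pairs (f, n//f)
def pvPairs (n : Int) (f : Int) : List (Int × Int) :=
  if h : f * f ≤ n then
    (if PySem.Int.mod n f = 0 then [(f, PySem.Int.floordiv n f)] else []) ++ pvPairs n (f + 1)
  else []
termination_by (n + 1 - f).toNat
decreasing_by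
  have hf : f ≤ n := by nlinarith [mul_self_nonneg f]
  omega

def pvFmt1 (p q : Int) : String :=
  PySem.Str.replace ("(x+" ++ PySem.Int.toStr p ++ ")(x+" ++ PySem.Int.toStr q ++ ")") "+-" "-"

def pvFmt2 (p q r s : Int) : String :=
  PySem.Str.replace (PySem.Str.replace
    ("(" ++ PySem.Int.toStr p ++ "x+" ++ PySem.Int.toStr q ++ ")(" ++
     PySem.Int.toStr r ++ "x+" ++ PySem.Int.toStr s ++ ")") "+-" "-") "1x" "x"

def pvLoop1 (addTerm lterm : Int) : List (Int × Int) → Option String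
  | [] => none
  | (d, e) :: rest =>
    if addTerm > 0 then
      if d + e = addTerm then some (pvFmt1 d e)
      else if e - d = addTerm then some (pvFmt1 (-d) e)
      else pvLoop1 addTerm lterm rest
    else if addTerm < 0 then
      if d + e = -addTerm then some (pvFmt1 (-d) (-e))
      else if d - e = addTerm then some (pvFmt1 d (-e))
      else pvLoop1 addTerm lterm rest
    else
      if lterm < 0 ∧ d = e then some (pvFmt1 d (-e)) else pvLoop1 addTerm lterm rest

def pvCheck (f1 f2 addTerm : Int) : List (Int × Int) → Option String
  | [] => none
  | (l1, l2) :: rest =>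
    if l1 * f2 + l2 * f1 = addTerm then some (pvFmt2 f1 l1 f2 l2)
    else if f1 * l1 + f2 * l2 = addTerm then some (pvFmt2 f1 l2 f2 l1)
    else pvCheck f1 f2 addTerm rest

def pvLoopL (f1 f2 addTerm lterm : Int) : List (Int × Int) → Option String
  | [] => none
  | (ld, lD) :: rest =>
    let lcands : List (Int × Int) :=
      if lterm > 0 then [(lD, ld), (-ld, -lD)] else [(lD, -ld), (ld, -lD)]
    match pvCheck f1 f2 addTerm lcands with
    | some s => some s
    | none => pvLoopL f1 f2 addTerm lterm rest

def pvLoopFc (lpairs : List (Int × Int)) (addTerm lterm : Int) : List (Int × Int) → Option String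
  | [] => none
  | (f1, f2) :: rest =>
    match pvLoopL f1 f2 addTerm lterm lpairs with
    | some s => some s
    | none => pvLoopFc lpairs addTerm lterm rest

def pvLoopF (lpairs : List (Int × Int)) (addTerm lterm fterm : Int) : List (Int × Int) → Option String
  | [] => none
  | (fd, fD) :: rest =>
    let fcands : List (Int × Int) :=
      if fterm > 0 then [(fD, fd), (-fd, -fD)] else [(fD, -fd), (fd, -fD)]
    match pvLoopFc lpairs addTerm lterm fcands with
    | some s => some s
    | none => pvLoopF lpairs addTerm lterm fterm rest

def doTri_alt (termsList : List Int) : Option String :=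
  let fterm := PySem.List.pyGetD termsList 0 0
  let addTerm := PySem.List.pyGetD termsList 1 0
  let lterm := PySem.List.pyGetD termsList 2 0
  let lpairs := pvPairs |lterm| 1
  if fterm = 1 then pvLoop1 addTerm lterm lpairs
  else pvLoopF lpairs addTerm lterm fterm (pvPairs |fterm| 1)

-- ===== PRECONDITION & SPEC =====
-- Pre_ excludes exactly the inputs on which Python A raises: lists shorter than 3 (IndexError).
def Pre_doTri (termsList : List Int) : Prop := 3 ≤ termsList.length
instance (termsList : List Int) : Decidable (Pre_doTri termsList) := by unfold Pre_doTri; infer_instance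
def pvWitness_doTri : List Int := [1, 5, 6]

def Spec_doTri (termsList : List Int) (out : Option String) : Prop := out = doTri_alt termsList
instance (termsList : List Int) (out : Option String) : Decidable (Spec_doTri termsList out) := by unfold Spec_doTri; infer_instance

-- ===== CLAIM (what is proved, stated in full; the proofs are below) =====
def Claim_equal_doTri : Prop := ∀ (termsList : List Int), Dom_doTri termsList → Pre_doTri termsList → Spec_doTri termsList (doTri termsList)

-- ===== LEMMAS AND PROOFS =====

def pvD (n : ℕ) : List ℕ := (List.range' 1 n).filter (fun d => n % d == 0)
def pvS (n : ℕ) : List ℕ := (pvD n).filter (fun d => d * d ≤ n)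

lemma pvD_pairwise (n : ℕ) : (pvD n).Pairwise (· < ·) :=
  List.Pairwise.sublist List.filter_sublist (List.pairwise_lt_range' (s := 1) (n := n))

lemma mem_pvD (n d : ℕ) : d ∈ pvD n ↔ 1 ≤ d ∧ d ≤ n ∧ d ∣ n := by
  simp only [pvD, List.mem_filter, List.mem_range'_1, beq_iff_eq, ← Nat.dvd_iff_mod_eq_zero]
  constructor
  · rintro ⟨⟨h1, h2⟩, h3⟩; exact ⟨h1, by omega, h3⟩
  · rintro ⟨h1, h2, h3⟩
    rcases Nat.eq_zero_or_pos n with rfl | hn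
    · exfalso; rcases h3 with ⟨k, hk⟩; omega
    · exact ⟨⟨h1, by omega⟩, h3⟩

-- involution facts
lemma pvD_mem_div {n d : ℕ} (h : d ∈ pvD n) : n / d ∈ pvD n := by
  rw [mem_pvD] at *
  obtain ⟨h1, h2, h3⟩ := h
  refine ⟨Nat.one_le_div_iff (by omega) |>.2 h2, Nat.div_le_self _ _, Nat.div_dvd_of_dvd h3⟩

lemma pvD_div_antitone {n d e : ℕ} (hd : d ∈ pvD n) (he : e ∈ pvD n) (hlt : d < e) : n / e < n / d := by
  rw [mem_pvD] at *
  obtain ⟨hd1, hd2, hd3⟩ := hd; obtain ⟨he1, he2, he3⟩ := he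
  have h1 : d * (n / d) = n := Nat.mul_div_cancel' hd3
  have h2 : e * (n / e) = n := Nat.mul_div_cancel' he3
  nlinarith [Nat.one_le_div_iff (show 0 < e by omega) |>.2 he2]

lemma pvD_div_div {n d : ℕ} (h : d ∈ pvD n) : n / (n / d) = d := by
  rw [mem_pvD] at h
  exact Nat.div_div_self h.2.2 (by omega)

lemma pvD_rev (n : ℕ) : (pvD n).map (fun d => n / d) = (pvD n).reverse := by
  have hnd : (pvD n).Nodup := (pvD_pairwise n).nodup
  have hndm : ((pvD n).map (fun d => n / d)).Nodup := by
    refine List.Nodup.map_on ?_ hnd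
    intro x hx y hy hxy
    have h1 := pvD_div_div hx; have h2 := pvD_div_div hy
    rw [← h1, ← h2, hxy]
  have hperm : ((pvD n).map (fun d => n / d)).Perm ((pvD n).reverse) := by
    refine ((List.perm_ext_iff_of_nodup hndm (by simpa using hnd)).2 ?_)
    intro a
    simp only [List.mem_map, List.mem_reverse]
    constructor
    · rintro ⟨x, hx, rfl⟩; exact pvD_mem_div hx
    · intro ha
      exact ⟨n / a, pvD_mem_div ha, pvD_div_div ha⟩
  have hs1 : ((pvD n).map (fun d => n / d)).Pairwise (fun a b : ℕ => b ≤ a) := by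
    rw [List.pairwise_map]
    refine List.Pairwise.imp_of_mem ?_ (pvD_pairwise n)
    intro a b ha hb hab
    exact le_of_lt (pvD_div_antitone ha hb hab)
  have hs2 : ((pvD n).reverse).Pairwise (fun a b : ℕ => b ≤ a) := by
    rw [List.pairwise_reverse]
    exact (pvD_pairwise n).imp le_of_lt
  exact hperm.eq_of_pairwise (fun a b _ _ h1 h2 => le_antisymm h2 h1) hs1 hs2

def pvM (n : ℕ) : List ℕ := pvS n ++ ((pvS n).map (fun d => n / d)).reverse
def pvSlt (n : ℕ) : List ℕ := (pvD n).filter (fun d => d * d < n)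

lemma filter_split_sorted (p : ℕ → Bool) :
    ∀ (l : List ℕ), l.Pairwise (· < ·) → (∀ x y, x ≤ y → p y = true → p x = true) →
      l = l.filter p ++ l.filter (fun x => !(p x))
  | [], _, _ => rfl
  | a :: l, hp, hmono => by
    have ih := filter_split_sorted p l (hp.of_cons) hmono
    by_cases ha : p a = true
    · simp only [List.filter_cons, ha, Bool.not_true, cond_true, if_pos]
      simpa using ih
    · have hall : ∀ x ∈ l, p x = false := by
        intro x hx
        by_contra hpx
        exact ha (hmono a x (le_of_lt (List.rel_of_pairwise_cons hp hx)) (by simpa using hpx))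
      simp only [List.filter_cons, ha, Bool.not_false]
      have h1 : List.filter p l = [] := List.filter_eq_nil_iff.2 (by intro x hx; simp [hall x hx])
      have h2 : List.filter (fun x => !(p x)) l = l :=
        List.filter_eq_self.2 (by intro x hx; simp [hall x hx])
      simp [ha, h1, h2]

lemma last_split : ∀ (l : List ℕ), l.Pairwise (· < ·) → ∀ r, r ∈ l → (∀ x ∈ l, x ≤ r) →
      l = l.filter (fun x => x ≠ r) ++ [r]
  | [], _, r, hr, _ => by simp at hr
  | a :: l, hp, r, hr, hle => by
    rcases List.mem_cons.1 hr with rfl | hrl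
    · have : l = [] := by
        rcases l with _ | ⟨b, l'⟩
        · rfl
        · exfalso
          have hb := List.rel_of_pairwise_cons hp (show b ∈ b :: l' by simp)
          have := hle b (by simp)
          omega
      simp [this]
    · have har : a < r := List.rel_of_pairwise_cons hp hrl
      have ih := last_split l hp.of_cons r hrl (fun x hx => hle x (List.mem_cons_of_mem _ hx))
      simp only [List.filter_cons]
      rw [if_pos (by simp; omega)]
      simpa using ih

lemma pvSlt_spec (n : ℕ) :
    ((pvD n).filter (fun d => n < d * d)) = ((pvSlt n).map (fun d => n / d)).reverse := by
  have hcongr : (pvD n).filter (fun d => decide (n < (n / d) * (n / d))) = pvSlt n := by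
    apply List.filter_congr
    intro d hd
    rw [mem_pvD] at hd
    obtain ⟨h1d, h2d, h3d⟩ := hd
    have hdd : d * (n / d) = n := Nat.mul_div_cancel' h3d
    have hd1 : 1 ≤ n / d := Nat.one_le_div_iff (by omega) |>.2 h2d
    simp only [decide_eq_decide]
    constructor <;> intro hlt <;> nlinarith
  have step : (pvSlt n).map (fun d => n / d) = ((pvD n).filter (fun d => n < d * d)).reverse := by
    have hcomp : (fun d : ℕ => decide (n < (n / d) * (n / d)))
        = ((fun d : ℕ => decide (n < d * d)) ∘ (fun d : ℕ => n / d)) := rfl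
    rw [← hcongr, hcomp, ← List.filter_map, pvD_rev n, List.filter_reverse]
  rw [step, List.reverse_reverse]

lemma pvS_pairwise (n : ℕ) : (pvS n).Pairwise (· < ·) :=
  List.Pairwise.sublist List.filter_sublist (pvD_pairwise n)

lemma pvD_split (n : ℕ) : pvD n = pvS n ++ ((pvSlt n).map (fun d => n / d)).reverse := by
  have h := filter_split_sorted (fun d => decide (d * d ≤ n)) (pvD n) (pvD_pairwise n)
    (by intro x y hxy hy; simp at hy ⊢; nlinarith)
  have h2 : (pvD n).filter (fun x => !(decide (x * x ≤ n))) = (pvD n).filter (fun d => n < d * d) := by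
    apply List.filter_congr; intro d _; by_cases h : d * d ≤ n <;> simp [h] <;> omega
  rw [h2, pvSlt_spec] at h
  exact h

lemma pvD_eq_M_or (n : ℕ) :
    (pvD n = pvM n ∧ (pvD n).length % 2 = 0) ∨
    (∃ r, r * r = n ∧ pvS n = pvSlt n ++ [r] ∧
      pvD n = pvSlt n ++ [r] ++ ((pvSlt n).map (fun d => n / d)).reverse) := by
  by_cases hsq : ∃ r ∈ pvD n, r * r = n
  · right
    obtain ⟨r, hrD, hrr⟩ := hsq
    have hrS : r ∈ pvS n := by
      simp only [pvS, List.mem_filter]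
      exact ⟨hrD, by simp [hrr]⟩
    have hle : ∀ x ∈ pvS n, x ≤ r := by
      intro x hx
      simp only [pvS, List.mem_filter] at hx
      have := of_decide_eq_true hx.2
      nlinarith
    have hsplit := last_split (pvS n) (pvS_pairwise n) r hrS hle
    have hfilt : (pvS n).filter (fun x => x ≠ r) = pvSlt n := by
      simp only [pvS, pvSlt, List.filter_filter]
      apply List.filter_congr
      intro d hd
      by_cases hdr : d = r
      · subst hdr
        simp [hrr]
      · have hne : d * d ≠ n := by
          rintro h
          exact hdr (by nlinarith)
        simp only [hdr, ne_eq, not_false_eq_true, decide_true, Bool.true_and, decide_eq_decide]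
        omega
    rw [hfilt] at hsplit
    refine ⟨r, hrr, hsplit, ?_⟩
    rw [pvD_split n, hsplit]
  · left
    have hS : pvS n = pvSlt n := by
      apply List.filter_congr
      intro d hd
      simp only [decide_eq_decide]
      have : d * d ≠ n := fun h => hsq ⟨d, hd, h⟩
      omega
    constructor
    · rw [pvD_split n, pvM, hS]
    · rw [pvD_split n, hS]
      simp [Nat.add_mul_mod_self_left]
      omega

lemma pvBase_eq (n : ℕ) :
    ((PySem.List.pyRange 1 ((n : Int) + 1) 1).filter (fun x => PySem.Int.mod (n : Int) x == 0))
      = (pvD n).map (fun (d : ℕ) => (d : Int)) := by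
  have hrange : PySem.List.pyRange 1 ((n : Int) + 1) 1 = (List.range' 1 n).map (fun d : ℕ => (d : Int)) := by
    rw [PySem.List.pyRange_one, List.range'_eq_map_range, List.map_map]
    have : ((n : Int) + 1 - 1).toNat = n := by omega
    rw [this]
    apply List.map_congr_left
    intro k _
    simp [Function.comp]
  rw [hrange, List.filter_map]
  unfold pvD
  congr 1
  apply List.filter_congr
  intro d _
  simp [Function.comp, PySem.Int.mod_natCast, Int.natCast_dvd_natCast, Nat.dvd_iff_mod_eq_zero]

lemma findFactors_eq (n : ℕ) : findFactors (n : Int) = (pvM n).map (fun (d : ℕ) => (d : Int)) := by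
  unfold findFactors
  simp only [pvBase_eq n]
  rcases pvD_eq_M_or n with ⟨hM, hpar⟩ | ⟨r, hrr, hS, hD⟩
  · rw [List.length_map]
    have : ((pvD n).length % 2 == 1) = false := by simp; omega
    rw [this]
    simp only [Bool.false_eq_true, if_false]
    rw [hM]
  · have hr1 : 1 ≤ r := by
      have : r ∈ pvS n := by rw [hS]; simp
      have := (mem_pvD n r).1 (List.filter_sublist.mem this)
      omega
    have hgr : n / r = r := by
      rw [← hrr, Nat.mul_div_cancel_left r (by omega)]
    set m := (pvSlt n).length with hm
    have hD' : pvD n = pvSlt n ++ (r :: ((pvSlt n).map (fun d => n / d)).reverse) := by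
      rw [hD]; simp
    have hlen : (pvD n).length = 2 * m + 1 := by
      rw [hD']
      simp only [List.length_append, List.length_cons, List.length_reverse, List.length_map]
      omega
    rw [List.length_map, hlen]
    have hcond : ((2 * m + 1) % 2 == 1) = true := by rw [beq_iff_eq]; omega
    rw [hcond]
    simp only [if_true]
    have hdiv : ((2 * m + 1 : ℕ) : Int) / 2 = (m : Int) := by push_cast; omega
    rw [hdiv]
    have hmle : m ≤ ((pvD n).map (fun (d : ℕ) => (d : Int))).length := by
      rw [List.length_map, hlen]; omega
    rw [PySem.List.insert_natCast _ m _ hmle, PySem.List.pyGetD_natCast]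
    rw [hD', List.map_append]
    have hmlen : ((pvSlt n).map (fun (d : ℕ) => (d : Int))).length = m := by rw [List.length_map]
    have hget : (((pvSlt n).map (fun (d : ℕ) => (d : Int))) ++
        ((r :: ((pvSlt n).map (fun d => n / d)).reverse).map (fun (d : ℕ) => (d : Int)))).getD m 0 = (r : Int) := by
      rw [List.getD_eq_getElem?_getD, List.getElem?_append_right (le_of_eq hmlen), hmlen]
      simp
    rw [hget]
    rw [List.take_left' hmlen, List.drop_left' hmlen]
    have hMv : pvM n = pvSlt n ++ (r :: (r :: ((pvSlt n).map (fun d => n / d)).reverse)) := by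
      unfold pvM
      rw [hS]
      simp [hgr]
    rw [hMv]
    simp

def pvBP (n : ℕ) : List (Int × Int) := (pvS n).map (fun (d : ℕ) => ((d : Int), ((n / d : ℕ) : Int)))

lemma pvPairs_aux (n : ℕ) : ∀ (k f : ℕ), k = n + 1 - f → 1 ≤ f →
    pvPairs (n : Int) (f : Int) =
      ((List.range' f (n + 1 - f)).filter (fun d => decide (d * d ≤ n) && (n % d == 0))).map
        (fun (d : ℕ) => ((d : Int), (Int.ofNat (n / d)))) := by
  intro k
  induction k using Nat.strong_induction_on with
  | _ k ih =>
    intro f hk hf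
    rw [pvPairs]
    by_cases h : (f : Int) * (f : Int) ≤ (n : Int)
    · have hffn : f * f ≤ n := by exact_mod_cast h
      have hfn : f ≤ n := le_trans (Nat.le_mul_of_pos_left f (by omega)) hffn
      rw [dif_pos h]
      have hrange : n + 1 - f = (n - f) + 1 := by omega
      rw [hrange, List.range'_succ]
      have hcast : ((f : Int) + 1) = ((f + 1 : ℕ) : Int) := by push_cast; ring
      have hih := ih (n + 1 - (f + 1)) (by omega) (f + 1) rfl (by omega)
      rw [hcast, hih]
      have hrange2 : n + 1 - (f + 1) = n - f := by omega
      rw [hrange2]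
      by_cases hd : n % f = 0
      · have hmod : PySem.Int.mod (n : Int) (f : Int) = 0 := by
          rw [PySem.Int.mod_natCast, hd]; rfl
        rw [if_pos hmod, List.filter_cons, if_pos (by simp [hffn, hd])]
        rw [PySem.Int.floordiv_natCast]
        simp
      · have hmod : ¬ PySem.Int.mod (n : Int) (f : Int) = 0 := by
          rw [PySem.Int.mod_natCast]
          exact_mod_cast hd
        rw [if_neg hmod, List.filter_cons, if_neg (by simp [hd])]
        simp
    · rw [dif_neg h]
      have hff : n < f * f := by
        by_contra hc
        exact h (by exact_mod_cast not_lt.1 hc)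
      have : (List.range' f (n + 1 - f)).filter (fun d => decide (d * d ≤ n) && (n % d == 0)) = [] := by
        apply List.filter_eq_nil_iff.2
        intro d hd
        have hdf : f ≤ d := (List.mem_range'_1.1 hd).1
        have : n < d * d := lt_of_lt_of_le hff (Nat.mul_le_mul hdf hdf)
        simp
        intro h'
        omega
      rw [this]
      simp

lemma pvPairs_eq (n : ℕ) : pvPairs (n : Int) 1 = pvBP n := by
  have h := pvPairs_aux n (n + 1 - 1) 1 rfl (le_refl 1)
  norm_num at h
  rw [h]
  unfold pvBP pvS pvD
  rw [List.filter_filter]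
  have hpred : (fun d : ℕ => decide (d * d ≤ n) && (n % d == 0)) = (fun d : ℕ => (n % d == 0) && decide (d * d ≤ n)) := by
    funext d; rw [Bool.and_comm]
  rw [hpred]
  apply List.map_congr_left
  intro d _
  have : (((n / d : ℕ)) : Int) = (n : Int) / (d : Int) := by simp [Int.natCast_div]
  rw [this]

lemma mem_pvS_mem_pvD {n d : ℕ} (h : d ∈ pvS n) : d ∈ pvD n := List.mem_of_mem_filter h

lemma pvS_getElem_facts (n : ℕ) (j : ℕ) (hj : j < (pvS n).length) :
    1 ≤ (pvS n)[j] ∧ (pvS n)[j] ∣ n ∧ 1 ≤ n ∧ 1 ≤ n / (pvS n)[j] ∧ (pvS n)[j] * (pvS n)[j] ≤ n := by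
  have hmem : (pvS n)[j] ∈ pvS n := List.getElem_mem hj
  have hD := (mem_pvD n _).1 (mem_pvS_mem_pvD hmem)
  have hsq : (pvS n)[j] * (pvS n)[j] ≤ n := by
    have := List.of_mem_filter hmem
    simpa using this
  exact ⟨hD.1, hD.2.2, by omega, Nat.one_le_div_iff (by omega) |>.2 hD.2.1, hsq⟩

lemma pvM_len (n : ℕ) : (pvM n).length = 2 * (pvS n).length := by
  simp [pvM]; omega

lemma pvM_getElem_lo (n : ℕ) (j : ℕ) (hj : j < (pvS n).length) :
    (pvM n)[j]'(by rw [pvM_len]; omega) = (pvS n)[j] := by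
  unfold pvM
  rw [List.getElem_append_left]

lemma pvM_getElem_hi (n : ℕ) (j : ℕ) (hj : j < (pvS n).length) :
    (pvM n)[2 * (pvS n).length - 1 - j]'(by rw [pvM_len]; omega) = n / (pvS n)[j] := by
  unfold pvM
  rw [List.getElem_append_right (by omega)]
  rw [List.getElem_reverse]
  rw [List.getElem_map]
  congr 1
  congr 1
  simp only [List.length_reverse, List.length_map]
  omega

lemma pvM_pairwise (n : ℕ) : (pvM n).Pairwise (· ≤ ·) := by
  unfold pvM
  rw [List.pairwise_append]
  refine ⟨(pvS_pairwise n).imp le_of_lt, ?_, ?_⟩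
  · rw [List.pairwise_reverse, List.pairwise_map]
    refine List.Pairwise.imp_of_mem ?_ (pvS_pairwise n)
    intro a b ha hb hab
    exact le_of_lt (pvD_div_antitone (mem_pvS_mem_pvD ha) (mem_pvS_mem_pvD hb) hab)
  · intro x hx y hy
    rw [List.mem_reverse, List.mem_map] at hy
    obtain ⟨d, hd, rfl⟩ := hy
    have hxD := (mem_pvD n x).1 (mem_pvS_mem_pvD hx)
    have hdD := (mem_pvD n d).1 (mem_pvS_mem_pvD hd)
    have hxs : x * x ≤ n := by simpa using List.of_mem_filter hx
    have hds : d * d ≤ n := by simpa using List.of_mem_filter hd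
    have hxd : x * d ≤ n := le_trans (Nat.mul_le_mul (le_refl x) (le_max_right x d) |>.trans
      (by rcases le_total x d with h | h
          · exact Nat.mul_le_mul h (le_refl _) |>.trans (by simp [max_eq_right h, hds])
          · simp [max_eq_left h]; exact hxs)) (le_refl n)
    have hdn : d * (n / d) = n := Nat.mul_div_cancel' hdD.2.2
    have := Nat.le_div_iff_mul_le (show 0 < d by omega) |>.2 (by omega : x * d ≤ n)
    exact this

lemma pvM_pos (n : ℕ) : ∀ x ∈ pvM n, 1 ≤ x := by
  intro x hx
  unfold pvM at hx
  rw [List.mem_append] at hx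
  rcases hx with hx | hx
  · exact ((mem_pvD n x).1 (mem_pvS_mem_pvD hx)).1
  · rw [List.mem_reverse, List.mem_map] at hx
    obtain ⟨d, hd, rfl⟩ := hx
    have := (mem_pvD n _).1 (pvD_mem_div (mem_pvS_mem_pvD hd))
    exact this.1

def pvMM (n : ℕ) : List Int :=
  ((pvM n).map (fun (d : ℕ) => (d : Int))).reverse ++
    ((pvM n).map (fun (d : ℕ) => (d : Int))).map (fun num => num * -1)

lemma pvMM_pairwise (n : ℕ) : (pvMM n).Pairwise (fun a b : Int => b ≤ a) := by
  unfold pvMM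
  rw [List.pairwise_append]
  refine ⟨?_, ?_, ?_⟩
  · rw [List.pairwise_reverse, List.pairwise_map]
    exact (pvM_pairwise n).imp (by intro a b h; exact_mod_cast h)
  · rw [List.pairwise_map, List.pairwise_map]
    exact (pvM_pairwise n).imp (by intro a b h; push_cast; omega)
  · intro x hx y hy
    rw [List.mem_reverse, List.mem_map] at hx
    obtain ⟨d, hd, rfl⟩ := hx
    rw [List.mem_map] at hy
    obtain ⟨z, hz, rfl⟩ := hy
    rw [List.mem_map] at hz
    obtain ⟨e, he, rfl⟩ := hz
    have h1 := pvM_pos n d hd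
    have h2 := pvM_pos n e he
    push_cast
    omega

lemma sorted_eq_pvMM (n : ℕ) :
    PySem.List.sorted (((pvM n).map (fun (d : ℕ) => (d : Int))).map (fun num => num * -1) ++
      (pvM n).map (fun (d : ℕ) => (d : Int))) (fun x => x) true = pvMM n := by
  set M' := (pvM n).map (fun (d : ℕ) => (d : Int)) with hM'
  have hperm : (PySem.List.sorted (M'.map (fun num => num * -1) ++ M') (fun x : Int => x) true).Perm (pvMM n) := by
    refine (PySem.List.sorted_perm _ _ _).trans ?_
    unfold pvMM
    rw [← hM']
    refine (List.perm_append_comm).trans ?_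
    exact List.Perm.append (List.reverse_perm M').symm (List.Perm.refl _)
  have hs1 : (PySem.List.sorted (M'.map (fun num => num * -1) ++ M') (fun x : Int => x) true).Pairwise
      (fun a b : Int => b ≤ a) := PySem.List.sorted_pairwise_rev _ _
  exact hperm.eq_of_pairwise (fun a b _ _ h1 h2 => le_antisymm h2 h1) hs1 (pvMM_pairwise n)

lemma pvMM_len (n : ℕ) : (pvMM n).length = 4 * (pvS n).length := by
  unfold pvMM
  simp [pvM_len]
  omega

lemma pvMM_getElem_master (n : ℕ) (i : ℕ) (h2 : i < 2 * (pvS n).length) :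
    ((pvMM n)[i]'(by rw [pvMM_len]; omega) =
      (((pvM n)[2 * (pvS n).length - 1 - i]'(by rw [pvM_len]; omega) : ℕ) : Int)) ∧
    ((pvMM n)[2 * (pvS n).length + i]'(by rw [pvMM_len]; omega) =
      (((pvM n)[i]'(by rw [pvM_len]; omega) : ℕ) : Int) * -1) := by
  constructor
  · show (pvMM n)[i]'_ = _
    unfold pvMM
    rw [List.getElem_append_left (by simp [pvM_len] <;> omega)]
    rw [List.getElem_reverse, List.getElem_map]
    congr 1
    exact getElem_congr rfl (by simp only [List.length_reverse, List.length_map, pvM_len] <;> omega) (by simp only [List.length_reverse, List.length_map, pvM_len] <;> omega)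
  · show (pvMM n)[2 * (pvS n).length + i]'_ = _
    unfold pvMM
    rw [List.getElem_append_right (by simp [pvM_len] <;> omega)]
    rw [List.getElem_map, List.getElem_map]
    congr 2
    exact getElem_congr rfl (by simp only [List.length_reverse, List.length_map, pvM_len] <;> omega) (by simp only [List.length_reverse, List.length_map, pvM_len] <;> omega)
lemma step1_eq (b c dI eI : Int) (hd : 1 ≤ dI) (he : 1 ≤ eI) (hcb : c ≠ 0) (r₁ : Option String) :
    (if (if dI + eI = |b| ∨ (b = 0 ∧ c > 0) then
          (if b > 0 then (dI, eI) else (-1 * dI, -1 * eI))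
        else
          (if b > 0 then (dI * -1, eI) else (dI, eI * -1))).1 +
        (if dI + eI = |b| ∨ (b = 0 ∧ c > 0) then
          (if b > 0 then (dI, eI) else (-1 * dI, -1 * eI))
        else
          (if b > 0 then (dI * -1, eI) else (dI, eI * -1))).2 = b then
      some (pvFmt1 (if dI + eI = |b| ∨ (b = 0 ∧ c > 0) then
          (if b > 0 then (dI, eI) else (-1 * dI, -1 * eI))
        else
          (if b > 0 then (dI * -1, eI) else (dI, eI * -1))).1
        (if dI + eI = |b| ∨ (b = 0 ∧ c > 0) then
          (if b > 0 then (dI, eI) else (-1 * dI, -1 * eI))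
        else
          (if b > 0 then (dI * -1, eI) else (dI, eI * -1))).2)
    else r₁)
    =
    (if b > 0 then
      if dI + eI = b then some (pvFmt1 dI eI)
      else if eI - dI = b then some (pvFmt1 (-dI) eI)
      else r₁
    else if b < 0 then
      if dI + eI = -b then some (pvFmt1 (-dI) (-eI))
      else if dI - eI = b then some (pvFmt1 dI (-eI))
      else r₁
    else
      if c < 0 ∧ dI = eI then some (pvFmt1 dI (-eI)) else r₁) := by
  rcases lt_trichotomy b 0 with hb | hb | hb
  · rw [abs_of_neg hb]
    have hb1 : ¬ b > 0 := by omega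
    by_cases h1 : dI + eI = -b
    · rw [if_pos (show dI + eI = -b ∨ (b = 0 ∧ c > 0) from Or.inl h1), if_neg hb1]
      rw [if_pos (show (-1 * dI, -1 * eI).1 + (-1 * dI, -1 * eI).2 = b by simp only; omega)]
      rw [if_neg hb1, if_pos hb, if_pos h1]
      simp only
      norm_num
    · rw [if_neg (show ¬(dI + eI = -b ∨ (b = 0 ∧ c > 0)) by rintro (h | h); omega; omega), if_neg hb1]
      rw [if_neg hb1, if_pos hb, if_neg h1]
      by_cases h2 : dI - eI = b
      · rw [if_pos (show (dI, eI * -1).1 + (dI, eI * -1).2 = b by simp only; omega), if_pos h2]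
        simp only
        norm_num
      · rw [if_neg (show ¬((dI, eI * -1).1 + (dI, eI * -1).2 = b) by simp only; omega), if_neg h2]
  · subst hb
    rw [abs_zero]
    have hb1 : ¬ (0 : Int) > 0 := by omega
    by_cases hcpos : c > 0
    · rw [if_pos (show dI + eI = 0 ∨ ((0 : Int) = 0 ∧ c > 0) from Or.inr ⟨rfl, hcpos⟩), if_neg hb1]
      rw [if_neg (show ¬((-1 * dI, -1 * eI).1 + (-1 * dI, -1 * eI).2 = 0) by simp only; omega)]
      rw [if_neg hb1, if_neg (show ¬ (0 : Int) < 0 by omega), if_neg (show ¬(c < 0 ∧ dI = eI) by rintro ⟨h, _⟩; omega)]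
    · have hcneg : c < 0 := by omega
      rw [if_neg (show ¬(dI + eI = 0 ∨ ((0 : Int) = 0 ∧ c > 0)) by rintro (h | h); omega; exact hcpos h.2), if_neg hb1]
      rw [if_neg hb1, if_neg (show ¬ (0 : Int) < 0 by omega)]
      by_cases h2 : dI = eI
      · rw [if_pos (show (dI, eI * -1).1 + (dI, eI * -1).2 = 0 by simp only; omega), if_pos ⟨hcneg, h2⟩]
        simp only
        norm_num
      · rw [if_neg (show ¬((dI, eI * -1).1 + (dI, eI * -1).2 = 0) by simp only; omega), if_neg (show ¬(c < 0 ∧ dI = eI) by rintro ⟨_, h⟩; exact h2 h)]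
  · rw [abs_of_pos hb]
    by_cases h1 : dI + eI = b
    · rw [if_pos (show dI + eI = b ∨ (b = 0 ∧ c > 0) from Or.inl h1), if_pos hb]
      rw [if_pos (show (dI, eI).1 + (dI, eI).2 = b by simp only; omega)]
      rw [if_pos hb, if_pos h1]
    · rw [if_neg (show ¬(dI + eI = b ∨ (b = 0 ∧ c > 0)) by rintro (h | h); omega; omega), if_pos hb]
      rw [if_pos hb, if_neg h1]
      by_cases h2 : eI - dI = b
      · rw [if_pos (show (dI * -1, eI).1 + (dI * -1, eI).2 = b by simp only; omega), if_pos h2]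
        simp only
        norm_num
      · rw [if_neg (show ¬((dI * -1, eI).1 + (dI * -1, eI).2 = b) by simp only; omega), if_neg h2]

lemma pvBP_len (n : ℕ) : (pvBP n).length = (pvS n).length := by simp [pvBP]

lemma pvBP_getElem (n : ℕ) (j : ℕ) (hj : j < (pvS n).length) :
    (pvBP n)[j]'(by rw [pvBP_len]; omega) =
      ((((pvS n)[j] : ℕ) : Int), ((n / (pvS n)[j] : ℕ) : Int)) := by
  unfold pvBP
  rw [List.getElem_map]

lemma cne (n : ℕ) (c : Int) (hc : n = c.natAbs) (hn : 1 ≤ n) : c ≠ 0 := by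
  intro h; subst h; simp at hc; omega

lemma loop1_eq (n : ℕ) (b c : Int) (hc : n = c.natAbs) : ∀ (k j : ℕ), k = (pvS n).length - j →
    doTriLoop1 ((pvM n).map (fun (d : ℕ) => (d : Int))) b c
      (PySem.List.pyRange (j : Int) (((pvS n).length : ℕ) : Int) 1) =
    pvLoop1 b c ((pvBP n).drop j) := by
  intro k
  induction k using Nat.strong_induction_on with
  | _ k ih =>
    intro j hk
    by_cases hj : j < (pvS n).length
    · have hfacts := pvS_getElem_facts n j hj
      rw [PySem.List.pyRange_one_cons (by exact_mod_cast hj)]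
      rw [List.drop_eq_getElem_cons (by rw [pvBP_len]; omega)]
      rw [pvBP_getElem n j hj]
      have hlen : (((pvM n).map (fun (d : ℕ) => (d : Int))).length : Int) = ((2 * (pvS n).length : ℕ) : Int) := by
        simp [pvM_len]
      simp only [doTriLoop1, pvLoop1, hlen]
      have hfst : PySem.List.pyGetD ((pvM n).map (fun (d : ℕ) => (d : Int))) (j : Int) 0 =
          (((pvS n)[j] : ℕ) : Int) := by
        rw [PySem.List.pyGetD_natCast, List.getD_eq_getElem?_getD,
          List.getElem?_eq_getElem (by simp [pvM_len]; omega)]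
        simp only [Option.getD_some, List.getElem_map]
        rw [pvM_getElem_lo n j hj]
      have hsnd : PySem.List.pyGetD ((pvM n).map (fun (d : ℕ) => (d : Int)))
          (((2 * (pvS n).length : ℕ) : Int) - (j : Int) - 1) 0 = ((n / (pvS n)[j] : ℕ) : Int) := by
        have hidx : (((2 * (pvS n).length : ℕ) : Int) - (j : Int) - 1) =
            ((2 * (pvS n).length - 1 - j : ℕ) : Int) := by push_cast; omega
        rw [hidx, PySem.List.pyGetD_natCast, List.getD_eq_getElem?_getD,
          List.getElem?_eq_getElem (by simp [pvM_len]; omega)]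
        simp only [Option.getD_some, List.getElem_map]
        rw [pvM_getElem_hi n j hj]
      rw [hfst, hsnd]
      have hih := ih ((pvS n).length - (j + 1)) (by omega) (j + 1) rfl
      have hcast : ((j : Int) + 1) = ((j + 1 : ℕ) : Int) := by push_cast; ring
      rw [hcast, hih]
      exact step1_eq b c (((pvS n)[j] : ℕ) : Int) ((n / (pvS n)[j] : ℕ) : Int)
        (by exact_mod_cast hfacts.1) (by exact_mod_cast hfacts.2.2.2.1)
        (cne n c hc hfacts.2.2.1) _
    · rw [PySem.List.pyRange_one_eq_nil (by exact_mod_cast not_lt.1 hj)]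
      rw [List.drop_of_length_le (by rw [pvBP_len]; omega)]
      simp [doTriLoop1, pvLoop1]

lemma check_eq (b : Int) (tup : Int × Int) : ∀ (L : List (Int × Int)),
    doTriCheck tup b L = pvCheck tup.1 tup.2 b L := by
  obtain ⟨f1, f2⟩ := tup
  intro L
  induction L with
  | nil => rfl
  | cons h t iht =>
    obtain ⟨l1, l2⟩ := h
    simp only [doTriCheck, pvCheck]
    rw [iht]
    rfl

lemma pvMM_g0 (n : ℕ) (j : ℕ) (hj : j < (pvS n).length) :
    PySem.List.pyGetD (pvMM n) (j : Int) 0 = ((n / (pvS n)[j] : ℕ) : Int) := by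
    rw [PySem.List.pyGetD_natCast, List.getD_eq_getElem?_getD,
      List.getElem?_eq_getElem (by rw [pvMM_len]; omega)]
    rw [Option.getD_some, (pvMM_getElem_master n j (by omega)).1]
    congr 1
    rw [← pvM_getElem_hi n j hj]
lemma pvMM_g1 (n : ℕ) (j : ℕ) (hj : j < (pvS n).length) :
    PySem.List.pyGetD (pvMM n) (((4 * (pvS n).length : ℕ) : Int) / 2 - 1 - (j : Int)) 0 =
      (((pvS n)[j] : ℕ) : Int) := by
    have hidx : (((4 * (pvS n).length : ℕ) : Int) / 2 - 1 - (j : Int)) =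
    ((2 * (pvS n).length - 1 - j : ℕ) : Int) := by push_cast; omega
    rw [hidx, PySem.List.pyGetD_natCast, List.getD_eq_getElem?_getD,
      List.getElem?_eq_getElem (by rw [pvMM_len]; omega)]
    rw [Option.getD_some, (pvMM_getElem_master n (2 * (pvS n).length - 1 - j) (by omega)).1]
    congr 1
    rw [← pvM_getElem_lo n j hj]
    exact getElem_congr rfl (by omega) (by rw [pvM_len]; omega)
lemma pvMM_g2 (n : ℕ) (j : ℕ) (hj : j < (pvS n).length) :
    PySem.List.pyGetD (pvMM n) (((4 * (pvS n).length : ℕ) : Int) / 2 + (j : Int)) 0 =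
      (((pvS n)[j] : ℕ) : Int) * -1 := by
    have hidx : (((4 * (pvS n).length : ℕ) : Int) / 2 + (j : Int)) =
    ((2 * (pvS n).length + j : ℕ) : Int) := by push_cast; omega
    rw [hidx, PySem.List.pyGetD_natCast, List.getD_eq_getElem?_getD,
      List.getElem?_eq_getElem (by rw [pvMM_len]; omega)]
    rw [Option.getD_some, (pvMM_getElem_master n j (by omega)).2]
    congr 2
    rw [← pvM_getElem_lo n j hj]
lemma pvMM_g3 (n : ℕ) (j : ℕ) (hj : j < (pvS n).length) :
    PySem.List.pyGetD (pvMM n) (((4 * (pvS n).length : ℕ) : Int) - 1 - (j : Int)) 0 =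
      ((n / (pvS n)[j] : ℕ) : Int) * -1 := by
    have hidx : (((4 * (pvS n).length : ℕ) : Int) - 1 - (j : Int)) =
    ((2 * (pvS n).length + (2 * (pvS n).length - 1 - j) : ℕ) : Int) := by push_cast; omega
    rw [hidx, PySem.List.pyGetD_natCast, List.getD_eq_getElem?_getD,
      List.getElem?_eq_getElem (by rw [pvMM_len]; omega)]
    rw [Option.getD_some, (pvMM_getElem_master n (2 * (pvS n).length - 1 - j) (by omega)).2]
    congr 2
    rw [← pvM_getElem_hi n j hj]

lemma loopI2_eq (n : ℕ) (b c : Int) (hc : n = c.natAbs) (tup : Int × Int) :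
    ∀ (k j : ℕ), k = (pvS n).length - j →
    doTriLoopI2 (pvMM n) b c tup (PySem.List.pyRange (j : Int) (((pvS n).length : ℕ) : Int) 1) =
    pvLoopL tup.1 tup.2 b c ((pvBP n).drop j) := by
  intro k
  induction k using Nat.strong_induction_on with
  | _ k ih =>
    intro j hk
    by_cases hj : j < (pvS n).length
    · have hfacts := pvS_getElem_facts n j hj
      rw [PySem.List.pyRange_one_cons (by exact_mod_cast hj)]
      rw [List.drop_eq_getElem_cons (by rw [pvBP_len]; omega)]
      rw [pvBP_getElem n j hj]
      have hlen : ((pvMM n).length : Int) = ((4 * (pvS n).length : ℕ) : Int) := by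
        simp [pvMM_len]
      simp only [doTriLoopI2, pvLoopL, hlen]
      rw [pvMM_g0 n j hj, pvMM_g1 n j hj, pvMM_g2 n j hj, pvMM_g3 n j hj]
      have hcands : (if c > 0 then
            [(((n / (pvS n)[j] : ℕ) : Int), (((pvS n)[j] : ℕ) : Int)),
              ((((pvS n)[j] : ℕ) : Int) * -1, ((n / (pvS n)[j] : ℕ) : Int) * -1)]
          else
            [(((n / (pvS n)[j] : ℕ) : Int), (((pvS n)[j] : ℕ) : Int) * -1),
              ((((pvS n)[j] : ℕ) : Int), ((n / (pvS n)[j] : ℕ) : Int) * -1)])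
          = (if c > 0 then
            [(((n / (pvS n)[j] : ℕ) : Int), (((pvS n)[j] : ℕ) : Int)),
              (-(((pvS n)[j] : ℕ) : Int), -((n / (pvS n)[j] : ℕ) : Int))]
          else
            [(((n / (pvS n)[j] : ℕ) : Int), -(((pvS n)[j] : ℕ) : Int)),
              ((((pvS n)[j] : ℕ) : Int), -((n / (pvS n)[j] : ℕ) : Int))]) := by
        split_ifs <;> norm_num
      rw [hcands, check_eq b tup]
      have hih := ih ((pvS n).length - (j + 1)) (by omega) (j + 1) rfl
      have hcast : ((j : Int) + 1) = ((j + 1 : ℕ) : Int) := by push_cast; ring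
      rw [hcast, hih]
    · rw [PySem.List.pyRange_one_eq_nil (by exact_mod_cast not_lt.1 hj)]
      rw [List.drop_of_length_le (by rw [pvBP_len]; omega)]
      simp [doTriLoopI2, pvLoopL]

lemma loopTup_eq (n : ℕ) (b c : Int) (hc : n = c.natAbs) : ∀ (L : List (Int × Int)),
    doTriLoopTup (pvMM n) b c L = pvLoopFc (pvBP n) b c L := by
  intro L
  induction L with
  | nil => rfl
  | cons tup rest iht =>
    simp only [doTriLoopTup, pvLoopFc]
    have hlen : ((pvMM n).length : Int) = ((4 * (pvS n).length : ℕ) : Int) := by simp [pvMM_len]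
    rw [hlen]
    have hdiv : (((4 * (pvS n).length : ℕ) : Int)) / 4 = (((pvS n).length : ℕ) : Int) := by
      push_cast; omega
    rw [hdiv]
    have hL := loopI2_eq n b c hc tup ((pvS n).length - 0) 0 rfl
    simp only [Nat.cast_zero, List.drop_zero] at hL
    rw [hL]
    obtain ⟨f1, f2⟩ := tup
    cases hres : pvLoopL f1 f2 b c (pvBP n) with
    | some s => rfl
    | none => exact iht

lemma loopI_eq (na nc : ℕ) (a b c : Int) (hc : nc = c.natAbs) :
    ∀ (k j : ℕ), k = (pvS na).length - j →
    doTriLoopI (pvMM na) (pvMM nc) b c a (PySem.List.pyRange (j : Int) (((pvS na).length : ℕ) : Int) 1) =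
    pvLoopF (pvBP nc) b c a ((pvBP na).drop j) := by
  intro k
  induction k using Nat.strong_induction_on with
  | _ k ih =>
    intro j hk
    by_cases hj : j < (pvS na).length
    · rw [PySem.List.pyRange_one_cons (by exact_mod_cast hj)]
      rw [List.drop_eq_getElem_cons (by rw [pvBP_len]; omega)]
      rw [pvBP_getElem na j hj]
      have hlen : ((pvMM na).length : Int) = ((4 * (pvS na).length : ℕ) : Int) := by simp [pvMM_len]
      simp only [doTriLoopI, pvLoopF, hlen]
      rw [pvMM_g0 na j hj, pvMM_g1 na j hj, pvMM_g2 na j hj, pvMM_g3 na j hj]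
      have hcands : (if a > 0 then
            [(((na / (pvS na)[j] : ℕ) : Int), (((pvS na)[j] : ℕ) : Int)),
              ((((pvS na)[j] : ℕ) : Int) * -1, ((na / (pvS na)[j] : ℕ) : Int) * -1)]
          else
            [(((na / (pvS na)[j] : ℕ) : Int), (((pvS na)[j] : ℕ) : Int) * -1),
              ((((pvS na)[j] : ℕ) : Int), ((na / (pvS na)[j] : ℕ) : Int) * -1)])
          = (if a > 0 then
            [(((na / (pvS na)[j] : ℕ) : Int), (((pvS na)[j] : ℕ) : Int)),
              (-(((pvS na)[j] : ℕ) : Int), -((na / (pvS na)[j] : ℕ) : Int))]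
          else
            [(((na / (pvS na)[j] : ℕ) : Int), -(((pvS na)[j] : ℕ) : Int)),
              ((((pvS na)[j] : ℕ) : Int), -((na / (pvS na)[j] : ℕ) : Int))]) := by
        split_ifs <;> norm_num
      rw [hcands]
      rw [loopTup_eq nc b c hc]
      cases hres : pvLoopFc (pvBP nc) b c
          (if a > 0 then
            [(((na / (pvS na)[j] : ℕ) : Int), (((pvS na)[j] : ℕ) : Int)),
              (-(((pvS na)[j] : ℕ) : Int), -((na / (pvS na)[j] : ℕ) : Int))]
          else
            [(((na / (pvS na)[j] : ℕ) : Int), -(((pvS na)[j] : ℕ) : Int)),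
              ((((pvS na)[j] : ℕ) : Int), -((na / (pvS na)[j] : ℕ) : Int))]) with
      | some s => rfl
      | none =>
        have hih := ih ((pvS na).length - (j + 1)) (by omega) (j + 1) rfl
        have hcast : ((j : Int) + 1) = ((j + 1 : ℕ) : Int) := by push_cast; ring
        rw [hcast, hih]
    · rw [PySem.List.pyRange_one_eq_nil (by exact_mod_cast not_lt.1 hj)]
      rw [List.drop_of_length_le (by rw [pvBP_len]; omega)]
      simp [doTriLoopI, pvLoopF]
theorem main_eq (ts : List Int) : doTri ts = doTri_alt ts := by
  unfold doTri doTri_alt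
  dsimp only
  have habs_c : |PySem.List.pyGetD ts 2 0| = (((PySem.List.pyGetD ts 2 0).natAbs : ℕ) : Int) :=
    Int.abs_eq_natAbs _
  rw [habs_c, findFactors_eq ((PySem.List.pyGetD ts 2 0).natAbs), pvPairs_eq]
  set a := PySem.List.pyGetD ts 0 0 with ha
  set b := PySem.List.pyGetD ts 1 0 with hb
  set c := PySem.List.pyGetD ts 2 0 with hcd
  set nc := c.natAbs with hnc
  by_cases hA : a = 1
  · rw [if_pos hA, if_pos hA]
    have hlen : ((((pvM nc).map (fun (d : ℕ) => (d : Int))).length : ℕ) : Int)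
        = ((2 * (pvS nc).length : ℕ) : Int) := by simp [pvM_len]
    rw [hlen]
    have hdiv : (((2 * (pvS nc).length : ℕ) : Int)) / 2 = (((pvS nc).length : ℕ) : Int) := by
      push_cast; omega
    rw [hdiv]
    have hL := loop1_eq nc b c hnc ((pvS nc).length - 0) 0 rfl
    simp only [Nat.cast_zero, List.drop_zero] at hL
    exact hL
  · rw [if_neg hA, if_neg hA]
    have habs_a : |a| = ((a.natAbs : ℕ) : Int) := Int.abs_eq_natAbs _
    rw [habs_a, findFactors_eq a.natAbs, pvPairs_eq]
    set na := a.natAbs with hna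
    rw [sorted_eq_pvMM na, sorted_eq_pvMM nc]
    have hlen : (((pvMM na).length : ℕ) : Int) = ((4 * (pvS na).length : ℕ) : Int) := by
      simp [pvMM_len]
    rw [hlen]
    have hdiv : (((4 * (pvS na).length : ℕ) : Int)) / 4 = (((pvS na).length : ℕ) : Int) := by
      push_cast; omega
    rw [hdiv]
    have hL := loopI_eq na nc a b c hnc ((pvS na).length - 0) 0 rfl
    simp only [Nat.cast_zero, List.drop_zero] at hL
    exact hL

-- ===== VERDICT (by name: the statement is the Claim_ definition above) =====
theorem doTri_spec : Claim_equal_doTri := by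
  intro ts _ _
  unfold Spec_doTri
  exact main_eq ts
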